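-- pv_equiv track=rewrite | github.com/SuperAsneiitor/timerParse | lib/parser_chaos/parser_format2.py | _valuesByColumns
-- ===== SOURCE A (Python) =====
-- ATTRS_ORDER = [
--     "Type",
--     "Fanout",
--     "Cap",
--     "D-Trans",
--     "Trans",
--     "Derate",
--     "x-coord",
--     "y-coord",
--     "D-Delay",
--     "Delay",
--     "Time",
--     "trigger_edge",
--     "Description",
-- ]
--
-- def _valuesByColumns(content: str, col_pos: dict[str, int]) -> dict[str, str]:
--     ordered = sorted([n for n in ATTRS_ORDER if n in col_pos], key=lambda x: col_pos[x])
--     if not ordered: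
--         return {}
--     out: dict[str, str] = {}
--     for i, name in enumerate(ordered):
--         start = col_pos[name]
--         end = col_pos[ordered[i + 1]] if i + 1 < len(ordered) else len(content)
--         value = content[start:end].strip() if start < end else ""
--         if value in ("-", "-0.000"):
--             value = ""
--         out[name] = value
--     return out
-- ===== SOURCE B (Python) =====
-- ATTRS_ORDER = [
--     "Type",
--     "Fanout",
--     "Cap",
--     "D-Trans",
--     "Trans",
--     "Derate",
--     "x-coord",
--     "y-coord",
--     "D-Delay",
--     "Delay",
--     "Time",
--     "trigger_edge",
--     "Description",
-- ]
--
-- def _valuesByColumns(content: str, col_pos: dict[str, int]) -> dict[str, str]: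
--     # Selection-based: no sort. Repeatedly extract the (position, ATTRS_ORDER-rank)-minimal
--     # column; its slice ends at the start of the next-minimal remaining column.
--     pending = [(col_pos[n], i, n) for i, n in enumerate(ATTRS_ORDER) if n in col_pos]
--     out: dict[str, str] = {}
--     while pending:
--         cur = min(pending)
--         pending.remove(cur)
--         end = min(pending)[0] if pending else len(content)
--         value = content[cur[0]:end].strip() if cur[0] < end else ""
--         if value in ("-", "-0.000"):
--             value = ""
--         out[cur[2]] = value
--     return out
-- ===== Notes on version B (the rewrite author's own statement) =====
-- stated objective: alternative
-- what changed: Replaces A's sort-then-scan (sorted ordered list plus ordered[i+1] lookahead, inserting into the dict as it scans) by a sort-free selection loop: repeatedly extract the (position, ATTRS_ORDER-rank)-minimal pending column and slice up to the start of the minimal remaining column.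
import Mathlib
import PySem

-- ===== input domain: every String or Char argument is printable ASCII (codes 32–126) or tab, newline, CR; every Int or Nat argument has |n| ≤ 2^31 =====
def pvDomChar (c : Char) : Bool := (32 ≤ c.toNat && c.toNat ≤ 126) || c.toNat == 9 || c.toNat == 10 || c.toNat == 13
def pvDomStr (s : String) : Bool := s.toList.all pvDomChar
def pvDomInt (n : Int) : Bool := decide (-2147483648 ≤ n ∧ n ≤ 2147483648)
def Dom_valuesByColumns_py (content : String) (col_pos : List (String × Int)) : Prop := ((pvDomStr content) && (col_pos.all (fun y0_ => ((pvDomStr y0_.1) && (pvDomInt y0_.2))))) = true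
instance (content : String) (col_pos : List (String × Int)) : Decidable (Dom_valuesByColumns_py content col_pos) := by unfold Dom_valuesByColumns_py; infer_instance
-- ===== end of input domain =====

-- B replaces A's sort-then-scan (sorted ordered list + ordered[i+1] lookahead) by a sort-free
-- selection loop: repeatedly extract the (position, rank)-minimal pending column, its slice
-- ending at the start of the minimal remaining column (alternative decomposition, same cost class).

-- ===== PORT A =====
def pvAttrsOrder : List String :=
  ["Type", "Fanout", "Cap", "D-Trans", "Trans", "Derate", "x-coord", "y-coord",
   "D-Delay", "Delay", "Time", "trigger_edge", "Description"]

-- A's first line: sorted([n for n in ATTRS_ORDER if n in col_pos], key=lambda x: col_pos[x])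
def pvOrderedCols (col_pos : List (String × Int)) : List String :=
  PySem.List.sorted (pvAttrsOrder.filter (fun n => (col_pos.lookup n).isSome))
    (fun x => (col_pos.lookup x).getD 0) false

-- body of A's 'for i, name in enumerate(ordered)' loop
def pvStepA (content : String) (col_pos : List (String × Int)) (ordered : List String)
    (out : PySem.Dict String String) (p : Int × String) : PySem.Dict String String :=
  let start := (col_pos.lookup p.2).getD 0
  let stop := if p.1 + 1 < (ordered.length : Int)
              then (col_pos.lookup (PySem.List.pyGetD ordered (p.1 + 1) "")).getD 0
              else PySem.Str.len content
  let value := if start < stop then PySem.Str.strip (PySem.Str.slice content (some start) (some stop)) else ""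
  let value := if value = "-" ∨ value = "-0.000" then "" else value
  out.insert p.2 value

def valuesByColumns_py (content : String) (col_pos : List (String × Int)) : List (String × String) :=
  let ordered := pvOrderedCols col_pos
  if ordered = [] then []
  else ((PySem.List.enumerate ordered 0).foldl (pvStepA content col_pos ordered) PySem.Dict.empty).items

-- ===== PORT B =====
-- the shared two normalization lines: strip/start<end guard and the '-'/'-0.000' sentinels
def pvVal (content : String) (s e : Int) : String :=
  let v := if s < e then PySem.Str.strip (PySem.Str.slice content (some s) (some e)) else ""
  let v := if v = "-" ∨ v = "-0.000" then "" else v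
  v

-- B's first line: [(col_pos[n], i, n) for i, n in enumerate(ATTRS_ORDER) if n in col_pos]
def pvBuild (col_pos : List (String × Int)) : List String → Nat → List (Int × Nat × String)
  | [], _ => []
  | n :: t, i =>
    match col_pos.lookup n with
    | some p => (p, i, n) :: pvBuild col_pos t (i + 1)
    | none => pvBuild col_pos t (i + 1)

-- tuple comparison used by min(pending); the name never decides (ranks are distinct)
def pvKeyLt (a b : Int × Nat × String) : Bool := a.1 < b.1 || (a.1 == b.1 && a.2.1 < b.2.1)

-- min(pending): Python's min keeps the first minimal element
def pvMinT (h : Int × Nat × String) (t : List (Int × Nat × String)) : Int × Nat × String :=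
  t.foldl (fun m x => if pvKeyLt x m then x else m) h

theorem pvMinT_mem (h : Int × Nat × String) (t : List (Int × Nat × String)) :
    pvMinT h t ∈ h :: t := by
  induction t generalizing h with
  | nil => simp [pvMinT]
  | cons x t ih =>
    have : pvMinT h (x :: t) = pvMinT (if pvKeyLt x h then x else h) t := rfl
    rw [this]
    have := ih (if pvKeyLt x h then x else h)
    rcases List.mem_cons.mp this with h1 | h1
    · rw [h1]; split_ifs <;> simp
    · simp [h1]

-- end = min(pending)[0] if pending else len(content)
def pvEnd (content : String) : List (Int × Nat × String) → Int
  | [] => PySem.Str.len content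
  | r :: rt => (pvMinT r rt).1

-- B's while loop: cur = min(pending); pending.remove(cur); out[cur[2]] = value
def pvLoop (content : String) (out : PySem.Dict String String) :
    List (Int × Nat × String) → PySem.Dict String String
  | [] => out
  | h :: t =>
    pvLoop content
      (out.insert (pvMinT h t).2.2
        (pvVal content (pvMinT h t).1 (pvEnd content ((h :: t).erase (pvMinT h t)))))
      ((h :: t).erase (pvMinT h t))
termination_by l => l.length
decreasing_by
  have h1 := List.length_erase_of_mem (pvMinT_mem h t)
  simp [h1]

def valuesByColumns_py_alt (content : String) (col_pos : List (String × Int)) : List (String × String) :=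
  (pvLoop content PySem.Dict.empty (pvBuild col_pos pvAttrsOrder 0)).items

-- ===== PRECONDITION & SPEC =====
def Spec_valuesByColumns_py (content : String) (col_pos : List (String × Int)) (out : List (String × String)) : Prop := out = valuesByColumns_py_alt content col_pos
instance (content : String) (col_pos : List (String × Int)) (out : List (String × String)) : Decidable (Spec_valuesByColumns_py content col_pos out) := by unfold Spec_valuesByColumns_py; infer_instance

-- ===== CLAIM (what is proved, stated in full; the proofs are below) =====
def Claim_equal_valuesByColumns_py : Prop := ∀ (content : String) (col_pos : List (String × Int)), Dom_valuesByColumns_py content col_pos → Spec_valuesByColumns_py content col_pos (valuesByColumns_py content col_pos)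

-- ===== LEMMAS AND PROOFS =====
def pvPos (col_pos : List (String × Int)) (n : String) : Int := (col_pos.lookup n).getD 0

-- the column values in ascending order: each value ends where the next column starts
def pvAV (content : String) (col_pos : List (String × Int)) : List String → List String
  | [] => []
  | [n] => [pvVal content (pvPos col_pos n) (PySem.Str.len content)]
  | n :: m :: t => pvVal content (pvPos col_pos n) (pvPos col_pos m) :: pvAV content col_pos (m :: t)

-- encode the (position, rank) key into one Int (ranks are < 16): lex order becomes Int order
def pvEnc (x : Int × Nat × String) : Int := x.1 * 16 + (x.2.1 : Int)

-- selection sort by pvKeyLt: the order in which B's loop extracts the pending columns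
def pvSelSort : List (Int × Nat × String) → List (Int × Nat × String)
  | [] => []
  | h :: t => pvMinT h t :: pvSelSort ((h :: t).erase (pvMinT h t))
termination_by l => l.length
decreasing_by
  have h1 := List.length_erase_of_mem (pvMinT_mem h t)
  simp [h1]

-- (name, value) pairs produced along a start-sorted triple list
def pvOut (content : String) : List (Int × Nat × String) → List (String × String)
  | [] => []
  | [x] => [(x.2.2, pvVal content x.1 (PySem.Str.len content))]
  | x :: y :: t => (x.2.2, pvVal content x.1 y.1) :: pvOut content (y :: t)

theorem pvKeyLt_iff (a b : Int × Nat × String) :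
    pvKeyLt a b = true ↔ (a.1 < b.1 ∨ (a.1 = b.1 ∧ a.2.1 < b.2.1)) := by
  simp [pvKeyLt]

theorem pvKeyLt_false_iff (a b : Int × Nat × String) :
    pvKeyLt a b = false ↔ ¬(a.1 < b.1 ∨ (a.1 = b.1 ∧ a.2.1 < b.2.1)) := by
  rw [← pvKeyLt_iff, Bool.eq_false_iff]

theorem pvMinT_not_lt (t : List (Int × Nat × String)) (h : Int × Nat × String) :
    ∀ x ∈ h :: t, pvKeyLt x (pvMinT h t) = false := by
  induction t generalizing h with
  | nil =>
    intro x hx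
    simp only [List.mem_singleton] at hx
    rw [hx]
    simp only [pvMinT, List.foldl_nil]
    rw [pvKeyLt_false_iff]
    omega
  | cons y t ih =>
    intro x hx
    by_cases hyh : pvKeyLt y h = true
    · have hrw : pvMinT h (y :: t) = pvMinT y t := by simp [pvMinT, hyh]
      rw [hrw]
      rcases List.mem_cons.mp hx with hxe | hx'
      · rw [hxe]
        have h1 := ih y y (by simp)
        rw [pvKeyLt_iff] at hyh
        rw [pvKeyLt_false_iff] at h1 ⊢
        omega
      · exact ih y x hx'
    · have hyh' : pvKeyLt y h = false := by simp [hyh]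
      have hrw : pvMinT h (y :: t) = pvMinT h t := by simp [pvMinT, hyh]
      rw [hrw]
      rcases List.mem_cons.mp hx with hxe | hx'
      · exact ih h x (by simp [hxe])
      · rcases List.mem_cons.mp hx' with hxe | hx''
        · rw [hxe]
          have h1 := ih h h (by simp)
          rw [pvKeyLt_false_iff] at hyh' h1 ⊢
          omega
        · exact ih h x (by simp [hx''])

theorem pvSelSort_perm (l : List (Int × Nat × String)) : (pvSelSort l).Perm l := by
  match l with
  | [] => simp [pvSelSort]
  | h :: t =>
    have hm := pvMinT_mem h t
    have ih := pvSelSort_perm ((h :: t).erase (pvMinT h t))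
    rw [pvSelSort]
    exact ((ih.cons (pvMinT h t)).trans (List.perm_cons_erase hm).symm)
termination_by l.length
decreasing_by
  have h1 := List.length_erase_of_mem (pvMinT_mem h t)
  simp [h1]

theorem pvSelSort_pairwise (l : List (Int × Nat × String))
    (hn : (l.map (fun x => x.2.1)).Nodup) :
    (pvSelSort l).Pairwise (fun a b => pvKeyLt a b = true) := by
  match l with
  | [] => simp [pvSelSort]
  | h :: t =>
    have hm := pvMinT_mem h t
    have hl : (h :: t).Nodup := hn.of_map
    have hrest : (((h :: t).erase (pvMinT h t)).map (fun x => x.2.1)).Nodup :=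
      hn.sublist (List.Sublist.map _ (List.erase_sublist))
    have ih := pvSelSort_pairwise ((h :: t).erase (pvMinT h t)) hrest
    rw [pvSelSort]
    refine List.Pairwise.cons ?_ ih
    intro b hb
    have hb' : b ∈ (h :: t).erase (pvMinT h t) :=
      ((pvSelSort_perm _).mem_iff).mp hb
    have hbl : b ∈ h :: t := (List.erase_sublist).mem hb'
    have hne : b ≠ pvMinT h t := by
      intro he
      rw [he] at hb'
      exact (List.Nodup.mem_erase_iff hl).mp hb' |>.1 rfl
    have hidx : b.2.1 ≠ (pvMinT h t).2.1 := fun he =>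
      hne (List.inj_on_of_nodup_map hn hbl hm he)
    have hnl := pvMinT_not_lt t h b hbl
    rw [pvKeyLt_false_iff] at hnl
    rw [pvKeyLt_iff]
    omega
termination_by l.length
decreasing_by
  have h1 := List.length_erase_of_mem (pvMinT_mem h t)
  simp [h1]

theorem pvSelSort_eq_sorted (l : List (Int × Nat × String))
    (hn : (l.map (fun x => x.2.1)).Nodup) (hb : ∀ x ∈ l, x.2.1 < 16) :
    PySem.List.sorted l pvEnc false = pvSelSort l := by
  apply PySem.List.sorted_eq_of_perm_of_pairwise_lt _ _ _ (pvSelSort_perm l)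
  refine List.Pairwise.imp_of_mem ?_ (pvSelSort_pairwise l hn)
  intro a b ha hbm hlt
  have ha' : a ∈ l := ((pvSelSort_perm l).mem_iff).mp ha
  have hb' : b ∈ l := ((pvSelSort_perm l).mem_iff).mp hbm
  have h1 := hb a ha'
  have h2 := hb b hb'
  rw [pvKeyLt_iff] at hlt
  unfold pvEnc
  omega

theorem pvLoopItems (content : String) (l : List (Int × Nat × String))
    (out : PySem.Dict String String)
    (hn : (l.map (fun x => x.2.2)).Nodup)
    (hf : ∀ x ∈ l, out.contains x.2.2 = false) :
    (pvLoop content out l).items = out.items ++ pvOut content (pvSelSort l) := by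
  match l with
  | [] => simp [pvLoop, pvSelSort, pvOut]
  | h :: t =>
    have hm := pvMinT_mem h t
    have hperm : (h :: t).Perm (pvMinT h t :: (h :: t).erase (pvMinT h t)) :=
      List.perm_cons_erase hm
    have hn2 : ((pvMinT h t :: (h :: t).erase (pvMinT h t)).map (fun x => x.2.2)).Nodup :=
      ((hperm.map (fun x => x.2.2)).nodup_iff).mp hn
    rw [List.map_cons, List.nodup_cons] at hn2
    have hfr : ∀ x ∈ (h :: t).erase (pvMinT h t),
        (out.insert (pvMinT h t).2.2
          (pvVal content (pvMinT h t).1 (pvEnd content ((h :: t).erase (pvMinT h t))))).contains x.2.2 = false := by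
      intro x hx
      rw [PySem.Dict.contains_insert]
      have h1 : x.2.2 ≠ (pvMinT h t).2.2 := by
        intro he
        exact hn2.1 (he ▸ List.mem_map_of_mem hx)
      have h2 : out.contains x.2.2 = false := hf x ((List.erase_sublist).mem hx)
      simp [h1, h2]
    have ih := pvLoopItems content ((h :: t).erase (pvMinT h t)) _ hn2.2 hfr
    rw [pvLoop, ih]
    rw [PySem.Dict.items_insert_of_not_contains out _ (hf _ hm)]
    rw [pvSelSort]
    rw [List.append_assoc]
    congr 1
    cases he : (h :: t).erase (pvMinT h t) with
    | nil => simp [pvSelSort, pvOut, pvEnd]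
    | cons r rt =>
      have : pvSelSort (r :: rt) = pvMinT r rt :: pvSelSort ((r :: rt).erase (pvMinT r rt)) := by
        rw [pvSelSort]
      rw [this, pvOut, pvEnd]
      simp
termination_by l.length
decreasing_by
  have h1 := List.length_erase_of_mem (pvMinT_mem h t)
  simp [h1]

theorem pvOutZip (content : String) (col_pos : List (String × Int)) (l : List (Int × Nat × String))
    (hc : ∀ x ∈ l, x.1 = pvPos col_pos x.2.2) :
    pvOut content l = (l.map (fun x => x.2.2)).zip (pvAV content col_pos (l.map (fun x => x.2.2))) := by
  match l with
  | [] => simp [pvOut, pvAV]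
  | [x] =>
    have h1 := hc x (by simp)
    simp [pvOut, pvAV, h1]
  | x :: y :: t =>
    have h1 := hc x (by simp)
    have h2 := hc y (by simp)
    have ih := pvOutZip content col_pos (y :: t) (fun z hz => hc z (List.mem_cons_of_mem x hz))
    rw [pvOut, ih]
    simp [pvAV, h1, h2]

theorem pvBuild_map_name (col_pos : List (String × Int)) (ns : List String) (i : Nat) :
    (pvBuild col_pos ns i).map (fun x => x.2.2) = ns.filter (fun n => (col_pos.lookup n).isSome) := by
  induction ns generalizing i with
  | nil => simp [pvBuild]
  | cons n t ih =>
    rw [pvBuild]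
    cases hl : col_pos.lookup n with
    | some p => simp [hl, ih]
    | none => simp [hl, ih]

theorem pvBuild_coh (col_pos : List (String × Int)) (ns : List String) (i : Nat) :
    ∀ x ∈ pvBuild col_pos ns i, x.1 = pvPos col_pos x.2.2 := by
  induction ns generalizing i with
  | nil => simp [pvBuild]
  | cons n t ih =>
    rw [pvBuild]
    cases hl : col_pos.lookup n with
    | some p =>
      intro x hx
      rcases List.mem_cons.mp hx with hxe | hx'
      · rw [hxe]; simp [pvPos, hl]
      · exact ih (i + 1) x hx'
    | none => exact ih (i + 1)

theorem pvBuild_idx_bounds (col_pos : List (String × Int)) (ns : List String) (i : Nat) :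
    ∀ x ∈ pvBuild col_pos ns i, i ≤ x.2.1 ∧ x.2.1 < i + ns.length := by
  induction ns generalizing i with
  | nil => simp [pvBuild]
  | cons n t ih =>
    rw [pvBuild]
    cases hl : col_pos.lookup n with
    | some p =>
      intro x hx
      rcases List.mem_cons.mp hx with hxe | hx'
      · rw [hxe]; simp
      · have := ih (i + 1) x hx'
        simp; omega
    | none =>
      intro x hx
      have := ih (i + 1) x hx
      simp; omega

theorem pvBuild_idx_pairwise (col_pos : List (String × Int)) (ns : List String) (i : Nat) :
    (pvBuild col_pos ns i).Pairwise (fun a b => a.2.1 < b.2.1) := by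
  induction ns generalizing i with
  | nil => simp [pvBuild]
  | cons n t ih =>
    rw [pvBuild]
    cases hl : col_pos.lookup n with
    | some p =>
      refine List.Pairwise.cons ?_ (ih (i + 1))
      intro b hb
      have := pvBuild_idx_bounds col_pos t (i + 1) b hb
      simp; omega
    | none => exact ih (i + 1)

theorem pvBuild_idx_nodup (col_pos : List (String × Int)) (ns : List String) (i : Nat) :
    ((pvBuild col_pos ns i).map (fun x => x.2.1)).Nodup := by
  have h := pvBuild_idx_pairwise col_pos ns i
  exact List.Pairwise.map _ (fun a b hlt => Nat.ne_of_lt hlt) h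

theorem map_insertBy (f : Int × Nat × String → String)
    (b : Int × Nat × String → Int × Nat × String → Bool) (b' : String → String → Bool)
    (x : Int × Nat × String) (acc : List (Int × Nat × String))
    (h : ∀ y ∈ acc, b x y = b' (f x) (f y)) :
    (PySem.List.insertBy b x acc).map f = PySem.List.insertBy b' (f x) (acc.map f) := by
  induction acc with
  | nil => simp [PySem.List.insertBy]
  | cons y t ih =>
    rw [PySem.List.insertBy]
    have hy := h y (by simp)
    by_cases hb : b x y = true
    · rw [if_pos hb]
      simp only [List.map_cons, PySem.List.insertBy]
      rw [← hy, if_pos hb]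
    · rw [if_neg hb]
      simp only [List.map_cons, PySem.List.insertBy]
      rw [← hy, if_neg hb, ih (fun z hz => h z (by simp [hz]))]

theorem pvBridge (col_pos : List (String × Int)) (pend : List (Int × Nat × String)) :
    ∀ (acc : List (Int × Nat × String)),
    (∀ x ∈ pend, x.1 = pvPos col_pos x.2.2 ∧ x.2.1 < 16) →
    (∀ y ∈ acc, y.1 = pvPos col_pos y.2.2 ∧ y.2.1 < 16) →
    (∀ y ∈ acc, ∀ x ∈ pend, y.2.1 < x.2.1) →
    pend.Pairwise (fun a b => a.2.1 < b.2.1) →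
    (pend.foldl (fun acc x => PySem.List.insertBy (fun a b => decide (pvEnc a < pvEnc b)) x acc) acc).map (fun x => x.2.2)
      = (pend.map (fun x => x.2.2)).foldl
          (fun acc n => PySem.List.insertBy (fun a b => decide (pvPos col_pos a < pvPos col_pos b)) n acc)
          (acc.map (fun x => x.2.2)) := by
  induction pend with
  | nil => intro acc _ _ _ _; simp
  | cons x rest ih =>
    intro acc hp ha hdom hpw
    have hx := hp x (by simp)
    rw [List.foldl_cons, List.map_cons, List.foldl_cons]
    have hmap : (PySem.List.insertBy (fun a b => decide (pvEnc a < pvEnc b)) x acc).map (fun z => z.2.2)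
        = PySem.List.insertBy (fun a b => decide (pvPos col_pos a < pvPos col_pos b)) x.2.2 (acc.map (fun z => z.2.2)) := by
      apply map_insertBy
      intro y hy
      have hyc := ha y hy
      have hyd := hdom y hy x (by simp)
      have : (pvEnc x < pvEnc y) ↔ (pvPos col_pos x.2.2 < pvPos col_pos y.2.2) := by
        rw [← hx.1, ← hyc.1]
        unfold pvEnc
        omega
      simp [this]
    rw [← hmap]
    apply ih
    · exact fun z hz => hp z (by simp [hz])
    · intro y hy
      rcases (PySem.List.mem_insertBy _ _ _ _).mp hy with rfl | hy'
      · exact hx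
      · exact ha y hy'
    · intro y hy z hz
      rcases (PySem.List.mem_insertBy _ _ _ _).mp hy with rfl | hy'
      · exact (List.pairwise_cons.mp hpw).1 z hz
      · exact hdom y hy' z (by simp [hz])
    · exact (List.pairwise_cons.mp hpw).2

-- A's loop result (reused characterization of A's fold)
theorem pvFoldA (content : String) (col_pos : List (String × Int)) :
    ∀ (suf pre : List String) (d : PySem.Dict String String),
      suf.Nodup → (∀ k ∈ suf, d.contains k = false) →
      ((PySem.List.enumerate suf (pre.length : Int)).foldl
          (pvStepA content col_pos (pre ++ suf)) d).items
        = d.items ++ suf.zip (pvAV content col_pos suf) := by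
  intro suf
  induction suf with
  | nil => intro pre d _ _; simp [PySem.List.enumerate_nil]
  | cons n t ih =>
    intro pre d hnd hfresh
    have hn : d.contains n = false := hfresh n (by simp)
    rw [PySem.List.enumerate_cons, List.foldl_cons]
    have hins : ∀ v : String, (d.insert n v).items = d.items ++ [(n, v)] := fun v =>
      PySem.Dict.items_insert_of_not_contains d (k := n) v hn
    cases t with
    | nil =>
      have hstep : pvStepA content col_pos (pre ++ [n]) d ((pre.length : Int), n)
          = d.insert n (pvVal content (pvPos col_pos n) (PySem.Str.len content)) := by
        simp only [pvStepA, pvVal, pvPos]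
        have hc : ¬ ((pre.length : Int) + 1 < ((pre ++ [n]).length : Int)) := by
          simp [List.length_append]
        rw [if_neg hc]
      rw [hstep]
      simp [PySem.List.enumerate_nil, hins, pvAV]
    | cons m t' =>
      have hstep : pvStepA content col_pos (pre ++ n :: m :: t') d ((pre.length : Int), n)
          = d.insert n (pvVal content (pvPos col_pos n) (pvPos col_pos m)) := by
        simp only [pvStepA, pvVal, pvPos]
        have hc : (pre.length : Int) + 1 < ((pre ++ n :: m :: t').length : Int) := by
          simp [List.length_append]
        rw [if_pos hc]
        have hcast : (pre.length : Int) + 1 = ((pre.length + 1 : Nat) : Int) := by push_cast; ring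
        rw [hcast, PySem.List.pyGetD_natCast]
        have hget : (pre ++ n :: m :: t').getD (pre.length + 1) "" = m := by
          unfold List.getD
          rw [List.getElem?_append_right (by omega)]
          simp
        rw [hget]
      rw [hstep]
      have hlen : (pre.length : Int) + 1 = (((pre ++ [n]).length : Nat) : Int) := by
        simp [List.length_append]
      have happ : pre ++ n :: m :: t' = (pre ++ [n]) ++ (m :: t') := by simp
      rw [hlen, happ]
      rw [ih (pre ++ [n]) (d.insert n (pvVal content (pvPos col_pos n) (pvPos col_pos m)))
            (hnd.sublist (List.sublist_cons_self n (m :: t')))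
            (by
              intro k hk
              rw [PySem.Dict.contains_insert]
              have hkn : k ≠ n := by
                rintro rfl
                exact (List.nodup_cons.mp hnd).1 hk
              simp [hkn, hfresh k (List.mem_cons_of_mem n hk)])]
      simp [hins, pvAV]

theorem pvOrdered_nodup (col_pos : List (String × Int)) : (pvOrderedCols col_pos).Nodup := by
  have h1 : (pvAttrsOrder.filter (fun n => (col_pos.lookup n).isSome)).Nodup :=
    List.Nodup.filter _ (by decide)
  exact (PySem.List.sorted_perm _ _ _).symm.nodup h1

-- ===== VERDICT (by name: the statement is the Claim_ definition above) =====
theorem valuesByColumns_py_spec : Claim_equal_valuesByColumns_py := by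
  intro content col_pos _
  unfold Spec_valuesByColumns_py valuesByColumns_py valuesByColumns_py_alt
  have hname : (pvBuild col_pos pvAttrsOrder 0).map (fun x => x.2.2)
      = pvAttrsOrder.filter (fun n => (col_pos.lookup n).isSome) := pvBuild_map_name _ _ _
  have hnnd : ((pvBuild col_pos pvAttrsOrder 0).map (fun x => x.2.2)).Nodup := by
    rw [hname]; exact List.Nodup.filter _ (by decide)
  have hidx := pvBuild_idx_nodup col_pos pvAttrsOrder 0
  have hbnd : ∀ x ∈ pvBuild col_pos pvAttrsOrder 0, x.2.1 < 16 := by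
    intro x hx
    have h1 := (pvBuild_idx_bounds col_pos pvAttrsOrder 0 x hx).2
    have h2 : pvAttrsOrder.length = 13 := by decide
    omega
  have hcoh := pvBuild_coh col_pos pvAttrsOrder 0
  have hB : (pvLoop content PySem.Dict.empty (pvBuild col_pos pvAttrsOrder 0)).items
      = pvOut content (pvSelSort (pvBuild col_pos pvAttrsOrder 0)) := by
    rw [pvLoopItems content _ PySem.Dict.empty hnnd (fun x _ => PySem.Dict.contains_empty _)]
    simp [PySem.Dict.empty]
  have hsorted := pvSelSort_eq_sorted (pvBuild col_pos pvAttrsOrder 0) hidx hbnd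
  have hord : (pvSelSort (pvBuild col_pos pvAttrsOrder 0)).map (fun x => x.2.2)
      = pvOrderedCols col_pos := by
    rw [← hsorted]
    unfold pvOrderedCols
    rw [PySem.List.sorted_eq_foldl_insertBy, PySem.List.sorted_eq_foldl_insertBy, ← hname]
    exact pvBridge col_pos (pvBuild col_pos pvAttrsOrder 0) []
      (fun x hx => ⟨hcoh x hx, hbnd x hx⟩) (by simp) (by simp)
      (pvBuild_idx_pairwise _ _ _)
  have hzip : pvOut content (pvSelSort (pvBuild col_pos pvAttrsOrder 0))
      = (pvOrderedCols col_pos).zip (pvAV content col_pos (pvOrderedCols col_pos)) := by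
    rw [pvOutZip content col_pos _
      (fun x hx => hcoh x ((pvSelSort_perm _).mem_iff.mp hx)), hord]
  by_cases hord0 : pvOrderedCols col_pos = []
  · have hsel : pvSelSort (pvBuild col_pos pvAttrsOrder 0) = [] := by
      have h1 := hord
      rw [hord0] at h1
      exact List.map_eq_nil_iff.mp h1
    simp [hord0, hB, hsel, pvOut]
  · simp only [if_neg hord0]
    have hA := pvFoldA content col_pos (pvOrderedCols col_pos) [] PySem.Dict.empty
      (pvOrdered_nodup col_pos) (fun k _ => PySem.Dict.contains_empty k)
    simp only [List.nil_append, List.length_nil, Nat.cast_zero] at hA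
    rw [hA, hB, hzip]
    simp [PySem.Dict.empty]
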